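-- pv_equiv track=rewrite | github.com/daniel-reich/ubiquitous-fiesta | cBPj6yfALGfmeZQLG_8.py | vertical_txt
-- ===== SOURCE A (Python) =====
-- def vertical_txt(txt):
--     result = []
--     txt = txt.split()
--     longest = len(sorted(txt, reverse=True, key=len)[0])
--
--     for i in range(len(txt)):
--         if len(txt[i]) < longest:
--             txt[i] = txt[i] + " " * (longest - len(txt[i]))
--
--     for j in range(longest):
--         add = []
--         for i in range(len(txt)):
--             add += txt[i][j]
--         result.append(add)
--
--     return result
-- ===== SOURCE B (Python) =====
-- def vertical_txt(txt):
--     words = txt.split()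
--     cols = []
--     while any(words):
--         cols.append([(w or ' ')[0] for w in words])
--         words = [w[1:] for w in words]
--     return cols
-- ===== Notes on version B (the rewrite author's own statement) =====
-- stated objective: simpler
-- what changed: Instead of computing the longest length via a full sort, padding every word, and indexing with nested loops, B repeatedly peels the first character off every word (filling with a space for exhausted words) until all words are empty, so no length computation, sort or padding pass exists.
-- crash fix: On whitespace-only input (txt.split() == []) A raises IndexError when indexing the sorted empty list, while B returns []. — e.g. on vertical_txt(" "): A raises IndexError, B returns []
import Mathlib
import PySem

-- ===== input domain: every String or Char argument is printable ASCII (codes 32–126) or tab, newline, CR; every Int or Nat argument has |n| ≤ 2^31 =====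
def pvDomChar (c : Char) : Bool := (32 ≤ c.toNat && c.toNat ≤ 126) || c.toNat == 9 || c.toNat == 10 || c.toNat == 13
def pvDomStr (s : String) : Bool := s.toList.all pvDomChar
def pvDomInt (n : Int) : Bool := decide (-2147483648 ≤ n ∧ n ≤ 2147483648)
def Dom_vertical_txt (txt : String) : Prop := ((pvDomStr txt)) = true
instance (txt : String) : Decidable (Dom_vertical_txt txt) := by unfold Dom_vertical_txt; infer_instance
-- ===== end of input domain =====

-- B replaces A's sort-for-max + padding pass + nested index loops by repeatedly peeling the
-- head character off every word (space once a word is exhausted) until all words are empty;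
-- objective: simpler. Pre_ excludes whitespace-only input, where A raises IndexError (B returns []).


-- ===== PORT A =====
-- A's words are handled as their List Char code points (bridged via String.toList).
-- body of A's padding loop: 'if len(txt[i]) < longest: txt[i] = txt[i] + " " * (longest - len(txt[i]))'
def pvAStep (longest : Int) (acc : List (List Char)) (i : Int) : List (List Char) :=
  match PySem.List.pyGet? acc i with
  | some w =>
    if PySem.Chars.len w < longest then
      acc.set i.toNat (w ++ PySem.List.pyRepeat [' '] (longest - PySem.Chars.len w))
    else acc
  | none => acc

-- body of A's inner column loop: 'add += txt[i][j]'  (txt[i][j] is a 1-char string)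
def pvAAdd (ws2 : List (List Char)) (j : Int) (add : List String) (i : Int) : List String :=
  match PySem.List.pyGet? ws2 i with
  | some w =>
    match PySem.List.pyGet? w j with
    | some c => add ++ [String.ofList [c]]
    | none => add   -- IndexError; unreachable after padding
  | none => add

def vertical_txt (txt : String) : List (List String) :=
  let ws : List (List Char) := (PySem.Str.split₀ txt).map String.toList
  match PySem.List.pyGet? (PySem.List.sorted ws (fun w => PySem.Chars.len w) true) 0 with
  | none => []   -- IndexError (empty split); excluded by Pre_vertical_txt
  | some w0 =>
    let longest : Int := PySem.Chars.len w0
    let ws2 : List (List Char) :=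
      (PySem.List.pyRange 0 (ws.length : Int) 1).foldl (pvAStep longest) ws
    (PySem.List.pyRange 0 longest 1).foldl
      (fun result j =>
        result ++ [(PySem.List.pyRange 0 (ws2.length : Int) 1).foldl (pvAAdd ws2 j) []]) []

-- ===== PORT B =====
-- termination measure fact for the while loop (cited by pvPeel's decreasing_by)
theorem pvPeel_dec (ws : List (List Char)) (w : List Char) (hw : w ∈ ws) (hne : w ≠ []) :
    ((ws.map fun v => v.drop 1).map List.length).sum < (ws.map List.length).sum := by
  induction ws with
  | nil => cases hw
  | cons x xs ih =>
    simp only [List.map_cons, List.sum_cons]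
    rcases List.mem_cons.mp hw with h | h
    · subst h
      have h1 : (w.drop 1).length < w.length := by
        cases w with
        | nil => exact absurd rfl hne
        | cons a t => simp
      have h2 : ((xs.map fun v => v.drop 1).map List.length).sum ≤ (xs.map List.length).sum := by
        clear ih h1 hne hw
        induction xs with
        | nil => simp
        | cons y ys ih2 =>
          simp only [List.map_cons, List.sum_cons]
          have : (y.drop 1).length ≤ y.length := by simp
          omega
      omega
    · have h1 : (x.drop 1).length ≤ x.length := by simp
      have := ih h
      omega

-- the while-loop of Source B: peel head characters until every word is empty
def pvPeel (ws : List (List Char)) : List (List String) :=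
  if ws.any (fun w => !w.isEmpty) then
    (ws.map (fun w => match w with | [] => " " | c :: _ => String.ofList [c])) ::
      pvPeel (ws.map (fun w => w.drop 1))
  else []
termination_by (ws.map List.length).sum
decreasing_by
  rename_i h
  simp only [List.any_eq_true, Bool.not_eq_eq_eq_not, Bool.not_true, List.isEmpty_eq_false_iff] at h
  obtain ⟨w, hw, hne⟩ := h
  have := pvPeel_dec ws w hw hne
  simpa [List.attach_map_val] using this

def vertical_txt_alt (txt : String) : List (List String) :=
  pvPeel ((PySem.Str.split₀ txt).map String.toList)

-- ===== PRECONDITION & SPEC =====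
-- Pre_ excludes exactly the inputs on which A raises IndexError: whitespace-only txt (empty split)
def Pre_vertical_txt (txt : String) : Prop := PySem.Str.split₀ txt ≠ []
instance (txt : String) : Decidable (Pre_vertical_txt txt) := by unfold Pre_vertical_txt; infer_instance
def pvWitness_vertical_txt : String := "ab c"

-- On whitespace-only input (txt.split() == []) A raises IndexError indexing the sorted empty list; B returns []
def Raises_vertical_txt (txt : String) : Prop := PySem.Str.split₀ txt = []
instance (txt : String) : Decidable (Raises_vertical_txt txt) := by unfold Raises_vertical_txt; infer_instance
def pvRaiseWitness_vertical_txt : String := " "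
def pvRaiseWitnessOut_vertical_txt : List (List String) := []

def Spec_vertical_txt (txt : String) (out : List (List String)) : Prop := out = vertical_txt_alt txt
instance (txt : String) (out : List (List String)) : Decidable (Spec_vertical_txt txt out) := by unfold Spec_vertical_txt; infer_instance

-- ===== CLAIM (what is proved, stated in full; the proofs are below) =====
def Claim_equal_vertical_txt : Prop := ∀ (txt : String), Dom_vertical_txt txt → Pre_vertical_txt txt → Spec_vertical_txt txt (vertical_txt txt)
def Claim_raises_vertical_txt : Prop := (∀ (txt : String), Dom_vertical_txt txt → Raises_vertical_txt txt → ¬ Pre_vertical_txt txt) ∧ (Dom_vertical_txt (pvRaiseWitness_vertical_txt) ∧ Raises_vertical_txt (pvRaiseWitness_vertical_txt) ∧ vertical_txt_alt (pvRaiseWitness_vertical_txt) = pvRaiseWitnessOut_vertical_txt)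

-- ===== LEMMAS AND PROOFS =====

-- maximum word length, and the row of j-th characters (space-filled), shared spec of both ports
def pvML (ws : List (List Char)) : Nat := (ws.map List.length).foldr max 0

def pvRow (ws : List (List Char)) (j : Nat) : List String :=
  ws.map (fun w => String.ofList [w.getD j ' '])

theorem le_pvML {w : List Char} {ws : List (List Char)} (h : w ∈ ws) : w.length ≤ pvML ws := by
  induction ws with
  | nil => cases h
  | cons x xs ih =>
    rcases List.mem_cons.mp h with h' | h'
    · subst h'; simp [pvML]
    · have := ih h'; simp only [pvML, List.map_cons, List.foldr_cons] at *; omega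

theorem pvML_le {ws : List (List Char)} {m : Nat} (h : ∀ w ∈ ws, w.length ≤ m) : pvML ws ≤ m := by
  induction ws with
  | nil => simp [pvML]
  | cons x xs ih =>
    have h1 := h x (by simp)
    have h2 := ih (fun w hw => h w (by simp [hw]))
    simp only [pvML, List.map_cons, List.foldr_cons] at *; omega

theorem pvML_eq_zero_iff {ws : List (List Char)} : pvML ws = 0 ↔ ∀ w ∈ ws, w = [] := by
  induction ws with
  | nil => simp [pvML]
  | cons x xs ih =>
    simp only [pvML, List.map_cons, List.foldr_cons] at *
    constructor
    · intro h w hw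
      rcases List.mem_cons.mp hw with h' | h'
      · subst h'; exact List.eq_nil_of_length_eq_zero (by omega)
      · exact ih.mp (by omega) w h'
    · intro h
      have hx : x.length = 0 := by simp [h x (by simp)]
      have : (xs.map List.length).foldr max 0 = 0 := ih.mpr (fun w hw => h w (by simp [hw]))
      omega

theorem pvML_drop (ws : List (List Char)) :
    pvML (ws.map (fun w => w.drop 1)) = pvML ws - 1 := by
  induction ws with
  | nil => simp [pvML]
  | cons x xs ih =>
    simp only [pvML, List.map_cons, List.foldr_cons] at *
    have : (x.drop 1).length = x.length - 1 := by simp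
    omega

theorem pvRow_drop (ws : List (List Char)) (j : Nat) :
    pvRow (ws.map (fun w => w.drop 1)) j = pvRow ws (j + 1) := by
  simp only [pvRow, List.map_map]
  apply List.map_congr_left
  intro w _
  cases w with
  | nil => rfl
  | cons c t => simp [List.getD]

theorem pvPeel_eq : ∀ (n : Nat) (ws : List (List Char)), pvML ws = n →
    pvPeel ws = (List.range n).map (pvRow ws) := by
  intro n
  induction n with
  | zero =>
    intro ws h
    rw [pvPeel.eq_def, if_neg]
    · simp
    · simp only [List.any_eq_true, Bool.not_eq_eq_eq_not, Bool.not_true, List.isEmpty_eq_false_iff,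
        not_exists]
      intro w hw
      exact hw.2 (pvML_eq_zero_iff.mp h w hw.1)
  | succ n ih =>
    intro ws h
    rw [pvPeel.eq_def, if_pos]
    · have htail := ih (ws.map (fun w => w.drop 1)) (by rw [pvML_drop, h]; omega)
      rw [htail]
      rw [List.range_succ_eq_map, List.map_cons, List.map_map]
      congr 1
      · apply List.map_congr_left
        intro w _
        cases w with
        | nil => rfl
        | cons c t => rfl
      · apply List.map_congr_left
        intro j _
        simp only [Function.comp]
        rw [pvRow_drop]
    · simp only [List.any_eq_true, Bool.not_eq_eq_eq_not, Bool.not_true, List.isEmpty_eq_false_iff]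
      by_contra hall
      have hz : pvML ws = 0 := pvML_eq_zero_iff.mpr (fun w hw => by
        by_contra hne
        exact hall ⟨w, hw, hne⟩)
      omega

-- A's padding loop maps each word to its space-padded form
theorem pvPadLoop (L : Nat) :
    ∀ (suf pre : List (List Char)), (∀ w ∈ suf, w.length ≤ L) →
    List.foldl (fun acc (k : Nat) => pvAStep (L : Int) acc (k : Int)) (pre ++ suf) (List.range' pre.length suf.length)
      = pre ++ suf.map (fun w => w ++ List.replicate (L - w.length) ' ') := by
  intro suf
  induction suf with
  | nil => intro pre _; simp
  | cons w rest ih =>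
    intro pre hle
    rw [List.length_cons, List.range'_succ, List.foldl_cons]
    have hw := hle w (by simp)
    have hstep : pvAStep (L : Int) (pre ++ w :: rest) (pre.length : Int)
        = pre ++ (w ++ List.replicate (L - w.length) ' ') :: rest := by
      rw [pvAStep, PySem.List.pyGet?_append_length]
      simp only [PySem.Chars.len_eq, PySem.List.pyRepeat_singleton]
      by_cases hcase : w.length < L
      · rw [if_pos (by exact_mod_cast hcase)]
        have h1 : ((L : Int) - (w.length : Int)).toNat = L - w.length := by omega
        have h2 : ((pre.length : Int)).toNat = pre.length := by omega
        rw [h1, h2]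
        simp
      · rw [if_neg (by exact_mod_cast hcase)]
        have : L - w.length = 0 := by omega
        rw [this]
        simp
    rw [hstep]
    have hrw : pre ++ (w ++ List.replicate (L - w.length) ' ') :: rest
        = (pre ++ [w ++ List.replicate (L - w.length) ' ']) ++ rest := by simp
    have hlen : pre.length + 1 = (pre ++ [w ++ List.replicate (L - w.length) ' ']).length := by simp
    rw [hrw, hlen, ih _ (fun v hv => hle v (by simp [hv]))]
    simp

-- A's inner column loop collects the j-th character of every (padded) word
theorem pvColRow (ws2 : List (List Char)) (L : Nat) (h : ∀ w ∈ ws2, w.length = L)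
    (jn : Nat) (hj : jn < L) :
    List.foldl (fun add (k : Nat) => pvAAdd ws2 (jn : Int) add (k : Int)) [] (List.range ws2.length)
      = ws2.map (fun w => String.ofList [w.getD jn ' ']) := by
  have hcongr : List.foldl (fun add (k : Nat) => pvAAdd ws2 (jn : Int) add (k : Int)) [] (List.range ws2.length)
      = List.foldl
          (fun add (k : Nat) => add ++ [String.ofList [(ws2.getD k []).getD jn ' ']]) [] (List.range ws2.length) := by
    apply PySem.List.foldl_congr_mem
    intro add k hk
    have hk' : k < ws2.length := List.mem_range.mp hk
    have h1 : PySem.List.pyGet? ws2 (k : Int) = some ws2[k] := by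
      rw [PySem.List.pyGet?_natCast, List.getElem?_eq_getElem hk']
    have hlen : ws2[k].length = L := h _ (List.getElem_mem hk')
    have h2 : PySem.List.pyGet? ws2[k] (jn : Int) = some ws2[k][jn] := by
      rw [PySem.List.pyGet?_natCast, List.getElem?_eq_getElem (by omega)]
    simp only [pvAAdd, h1, h2]
    have e1 : ws2.getD k [] = ws2[k] := by
      rw [List.getD_eq_getElem?_getD, List.getElem?_eq_getElem hk']
      rfl
    have e2 : ws2[k].getD jn ' ' = ws2[k][jn] := by
      rw [List.getD_eq_getElem?_getD, List.getElem?_eq_getElem (by omega)]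
      rfl
    rw [e1, e2]
  rw [hcongr, PySem.List.foldl_append_singleton_eq_map, List.nil_append]
  apply List.ext_getElem
  · simp
  · intro i h1 h2
    have hi : i < ws2.length := by simpa using h2
    simp only [List.getElem_map, List.getElem_range]
    have : ws2.getD i [] = ws2[i] := by
      rw [List.getD_eq_getElem?_getD, List.getElem?_eq_getElem hi]
      rfl
    rw [this]

-- the padded word agrees with space-defaulted indexing of the original word
theorem pvPad_getD (L : Nat) (w : List Char) (jn : Nat) (hj : jn < L) :
    (w ++ List.replicate (L - w.length) ' ').getD jn ' ' = w.getD jn ' ' := by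
  by_cases hcase : jn < w.length
  · rw [List.getD_eq_getElem?_getD, List.getElem?_append_left hcase,
      ← List.getD_eq_getElem?_getD]
  · rw [List.getD_eq_getElem?_getD, List.getD_eq_getElem?_getD,
      List.getElem?_append_right (by omega)]
    have h1 : w[jn]? = none := by rw [List.getElem?_eq_none_iff]; omega
    have h2 : (List.replicate (L - w.length) ' ')[jn - w.length]? = some ' ' := by
      rw [List.getElem?_eq_getElem (by simp; omega)]
      simp
    rw [h1, h2]
    rfl

-- ===== VERDICT (by name: the statement is the Claim_ definition above) =====
theorem vertical_txt_spec : Claim_equal_vertical_txt := by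
  intro txt _ hpre
  unfold Spec_vertical_txt vertical_txt vertical_txt_alt
  set ws : List (List Char) := (PySem.Str.split₀ txt).map String.toList with hws
  have hne : ws ≠ [] := by
    simp only [hws, ne_eq, List.map_eq_nil_iff]
    exact hpre
  obtain ⟨w0, t, hsorted⟩ : ∃ w0 t, PySem.List.sorted ws (fun w => PySem.Chars.len w) true = w0 :: t := by
    rcases hcase : PySem.List.sorted ws (fun w => PySem.Chars.len w) true with _ | ⟨w0, t⟩
    · exact absurd ((PySem.List.sorted_eq_nil_iff ws _ true).mp hcase) hne
    · exact ⟨w0, t, rfl⟩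
  simp only [hsorted, PySem.List.pyGet?_zero_cons]
  have hmem : w0 ∈ ws := by
    rw [← PySem.List.mem_sorted ws (fun w => PySem.Chars.len w) true, hsorted]
    exact List.mem_cons_self
  have hmax : ∀ w ∈ ws, w.length ≤ w0.length := by
    intro w hw
    have := PySem.List.key_head_sorted_rev_ge ws (fun w => PySem.Chars.len w) hsorted w hw
    simp only [PySem.Chars.len_eq] at this
    exact_mod_cast this
  have hML : pvML ws = w0.length := Nat.le_antisymm (pvML_le hmax) (le_pvML hmem)
  have hlen0 : PySem.Chars.len w0 = (w0.length : Int) := PySem.Chars.len_eq w0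
  rw [hlen0]
  have hws2 : List.foldl (pvAStep (w0.length : Int)) ws (PySem.List.pyRange 0 (ws.length : Int))
      = ws.map (fun w => w ++ List.replicate (w0.length - w.length) ' ') := by
    rw [PySem.List.pyRange_zero_natCast, List.foldl_map]
    have := pvPadLoop w0.length ws [] hmax
    simpa [List.range_eq_range'] using this
  rw [hws2]
  set ws2 := ws.map (fun w => w ++ List.replicate (w0.length - w.length) ' ') with hws2def
  have hlen2 : ∀ w ∈ ws2, w.length = w0.length := by
    intro w hw
    rw [hws2def] at hw
    obtain ⟨v, hv, rfl⟩ := List.mem_map.mp hw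
    have := hmax v hv
    simp only [List.length_append, List.length_replicate]
    omega
  rw [PySem.List.pyRange_zero_natCast w0.length, List.foldl_map,
    PySem.List.foldl_append_singleton_eq_map, List.nil_append]
  rw [pvPeel_eq (pvML ws) ws rfl, hML]
  apply List.map_congr_left
  intro jn hjn
  have hj : jn < w0.length := List.mem_range.mp hjn
  rw [PySem.List.pyRange_zero_natCast, List.foldl_map, pvColRow ws2 w0.length hlen2 jn hj]
  rw [hws2def, List.map_map, pvRow]
  apply List.map_congr_left
  intro w _
  simp only [Function.comp]
  rw [pvPad_getD w0.length w jn hj]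

@[simp] theorem vertical_txt_raises : Claim_raises_vertical_txt := by
  unfold Claim_raises_vertical_txt
  refine ⟨fun txt _ h hp => hp h, by decide, by decide, ?_⟩
  have h : PySem.Str.split₀ pvRaiseWitness_vertical_txt = [] := by decide
  rw [vertical_txt_alt, h, pvRaiseWitnessOut_vertical_txt]
  rw [pvPeel.eq_def]
  simp
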